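-- pv_equiv track=rewrite | github.com/yibie/org-supertag | test/minirag/minirag/utils.py | is_continuous_subsequence
-- ===== SOURCE A (Python) =====
-- def is_continuous_subsequence(subseq, seq):
--     def find_all_indexes(tup, value):
--         indexes = []
--         start = 0
--         while True:
--             try:
--                 index = tup.index(value, start)
--                 indexes.append(index)
--                 start = index + 1
--             except ValueError:
--                 break
--         return indexes
--
--     index_list = find_all_indexes(seq, subseq[0])
--     for idx in index_list:
--         if idx != len(seq) - 1:
--             if seq[idx + 1] == subseq[-1]:
--                 return True
--     return False
-- ===== SOURCE B (Python) =====
-- def is_continuous_subsequence(subseq, seq):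
--     first = subseq[0]
--     last = subseq[-1]
--     return any(a == first and b == last for a, b in zip(seq, seq[1:]))
-- ===== Notes on version B (the rewrite author's own statement) =====
-- stated objective: simpler
-- what changed: Replaces A's build-a-full-index-table-then-scan-it decomposition (with a try/except index helper) with one direct any() pass over adjacent pairs from zip(seq, seq[1:]).
import Mathlib
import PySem

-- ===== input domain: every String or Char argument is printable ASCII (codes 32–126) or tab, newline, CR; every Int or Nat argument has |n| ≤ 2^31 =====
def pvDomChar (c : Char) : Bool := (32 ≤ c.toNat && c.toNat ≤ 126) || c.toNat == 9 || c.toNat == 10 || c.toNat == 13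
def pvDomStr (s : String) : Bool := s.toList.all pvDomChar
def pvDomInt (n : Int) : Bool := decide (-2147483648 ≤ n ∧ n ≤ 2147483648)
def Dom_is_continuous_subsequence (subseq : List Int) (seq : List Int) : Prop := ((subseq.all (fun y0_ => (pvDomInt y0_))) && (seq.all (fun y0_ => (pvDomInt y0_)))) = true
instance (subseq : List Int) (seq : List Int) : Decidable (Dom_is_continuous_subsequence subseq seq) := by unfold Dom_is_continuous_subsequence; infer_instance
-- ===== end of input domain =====

-- B replaces A's index-table-then-scan decomposition with one pass over adjacent pairs (objective: simpler).

-- ===== PORT A =====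
-- the 'while True: try tup.index(value, start) …' loop of find_all_indexes;
-- fuel = tup.length + 1 - start only makes the loop total (start strictly increases each turn)
def pvFaiLoop (tup : List Int) (value : Int) : Nat → Nat → List Nat → List Nat
  | 0, _, acc => acc
  | fuel + 1, start, acc =>
    match PySem.List.index? (tup.drop start) value with
    | some i => pvFaiLoop tup value fuel (start + i + 1) (acc ++ [start + i])
    | none => acc

def pvFindAllIndexes (tup : List Int) (value : Int) : List Nat :=
  pvFaiLoop tup value (tup.length + 1) 0 []

-- the 'for idx in index_list' loop; seq[idx+1] and subseq[-1] are in range whenever reached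
def pvIcsLoop (subseq : List Int) (seq : List Int) : List Nat → Bool
  | [] => false
  | idx :: rest =>
    if idx ≠ seq.length - 1 then
      if PySem.List.pyGet? seq ((idx : Int) + 1) == PySem.List.pyGet? subseq (-1) then true
      else pvIcsLoop subseq seq rest
    else pvIcsLoop subseq seq rest

def is_continuous_subsequence (subseq : List Int) (seq : List Int) : Bool :=
  match PySem.List.pyGet? subseq 0 with
  | none => false  -- Python raises IndexError here; excluded by Pre_
  | some first => pvIcsLoop subseq seq (pvFindAllIndexes seq first)

-- ===== PORT B =====
def is_continuous_subsequence_alt (subseq : List Int) (seq : List Int) : Bool :=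
  match PySem.List.pyGet? subseq 0, PySem.List.pyGet? subseq (-1) with
  | some first, some last =>
      ((seq.zip (seq.drop 1)).any (fun p => p.1 == first && p.2 == last))
  | _, _ => false  -- Python raises IndexError here; excluded by Pre_

-- ===== PRECONDITION & SPEC =====
-- Pre_ excludes only subseq = [], on which Python A raises IndexError at subseq[0] (B raises there too)
def Pre_is_continuous_subsequence (subseq : List Int) (seq : List Int) : Prop := subseq ≠ []
instance (subseq : List Int) (seq : List Int) : Decidable (Pre_is_continuous_subsequence subseq seq) := by unfold Pre_is_continuous_subsequence; infer_instance
def pvWitness_is_continuous_subsequence : List Int × List Int := ([1, 2], [0, 1, 2, 3])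

def Spec_is_continuous_subsequence (subseq : List Int) (seq : List Int) (out : Bool) : Prop := out = is_continuous_subsequence_alt subseq seq
instance (subseq : List Int) (seq : List Int) (out : Bool) : Decidable (Spec_is_continuous_subsequence subseq seq out) := by unfold Spec_is_continuous_subsequence; infer_instance

-- ===== CLAIM (what is proved, stated in full; the proofs are below) =====
def Claim_equal_is_continuous_subsequence : Prop := ∀ (subseq : List Int) (seq : List Int), Dom_is_continuous_subsequence subseq seq → Pre_is_continuous_subsequence subseq seq → Spec_is_continuous_subsequence subseq seq (is_continuous_subsequence subseq seq)

-- ===== LEMMAS AND PROOFS =====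

-- membership in the fuel loop: acc plus every occurrence at position ≥ start
theorem pvFaiLoop_mem (tup : List Int) (v : Int) :
    ∀ (fuel start : Nat) (acc : List Nat) (k : Nat), tup.length + 1 - start ≤ fuel →
      (k ∈ pvFaiLoop tup v fuel start acc ↔
        k ∈ acc ∨ (start ≤ k ∧ k < tup.length ∧ tup[k]? = some v)) := by
  intro fuel
  induction fuel with
  | zero =>
    intro start acc k h
    simp only [pvFaiLoop]
    constructor
    · intro hk; exact Or.inl hk
    · rintro (hk | ⟨h1, h2, _⟩)
      · exact hk
      · omega
  | succ n ih =>
    intro start acc k h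
    simp only [pvFaiLoop]
    rcases hidx : PySem.List.index? (tup.drop start) v with _ | i
    · -- none: v ∉ tup.drop start, so no occurrence at position ≥ start
      rw [PySem.List.index?_eq_none_iff] at hidx
      constructor
      · intro hk; exact Or.inl hk
      · rintro (hk | ⟨h1, h2, h3⟩)
        · exact hk
        · exfalso
          apply hidx
          have : (tup.drop start)[k - start]? = some v := by
            rw [List.getElem?_drop]
            have : start + (k - start) = k := by omega
            rw [this]; exact h3
          exact List.mem_of_getElem? this
    · -- some i: first occurrence in tup.drop start is at local index i
      obtain ⟨hi, hv, hmin⟩ := PySem.List.getElem_of_index?_eq_some hidx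
      have hlen : start + i < tup.length := by
        have := hi; simp [List.length_drop] at this; omega
      have hval : tup[start + i]? = some v := by
        have : (tup.drop start)[i]? = some v := by
          rw [List.getElem?_eq_getElem hi, hv]
        rwa [List.getElem?_drop] at this
      rw [ih (start + i + 1) (acc ++ [start + i]) k (by omega)]
      simp only [List.mem_append, List.mem_singleton]
      constructor
      · rintro ((hk | hk) | ⟨h1, h2, h3⟩)
        · exact Or.inl hk
        · subst hk; exact Or.inr ⟨by omega, hlen, hval⟩
        · exact Or.inr ⟨by omega, h2, h3⟩
      · rintro (hk | ⟨h1, h2, h3⟩)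
        · exact Or.inl (Or.inl hk)
        · -- either k = start + i, or k > start + i (k < start + i contradicts minimality)
          rcases Nat.lt_trichotomy k (start + i) with hlt | heq | hgt
          · exfalso
            have hjk : k - start < i := by omega
            have : (tup.drop start)[k - start] ≠ v := by
              exact hmin (k - start) hjk
            apply this
            have hkd : (tup.drop start)[k - start]? = some v := by
              rw [List.getElem?_drop]
              have : start + (k - start) = k := by omega
              rw [this]; exact h3
            have hklen : k - start < (tup.drop start).length := by
              simp [List.length_drop]; omega
            rw [List.getElem?_eq_getElem hklen] at hkd
            exact Option.some_injective _ hkd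
          · exact Or.inl (Or.inr heq)
          · exact Or.inr ⟨by omega, h2, h3⟩

theorem pvFindAllIndexes_mem (tup : List Int) (v : Int) (k : Nat) :
    k ∈ pvFindAllIndexes tup v ↔ k < tup.length ∧ tup[k]? = some v := by
  unfold pvFindAllIndexes
  rw [pvFaiLoop_mem tup v (tup.length + 1) 0 [] k (by omega)]
  simp

theorem pvIcsLoop_eq_any (subseq seq : List Int) (l : List Nat) :
    pvIcsLoop subseq seq l =
      l.any (fun idx => decide (idx ≠ seq.length - 1) &&
        (PySem.List.pyGet? seq ((idx : Int) + 1) == PySem.List.pyGet? subseq (-1))) := by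
  induction l with
  | nil => simp [pvIcsLoop]
  | cons idx rest ih =>
    simp only [pvIcsLoop, List.any_cons]
    by_cases h1 : idx ≠ seq.length - 1
    · by_cases h2 : (PySem.List.pyGet? seq ((idx : Int) + 1) == PySem.List.pyGet? subseq (-1)) = true
      · simp [h1, h2]
      · simp only [Bool.not_eq_true] at h2
        simp [h1, h2, ih]
    · simp only [ne_eq, not_not] at h1
      simp [h1, ih]

-- ===== VERDICT (by name: the statement is the Claim_ definition above) =====
theorem is_continuous_subsequence_spec : Claim_equal_is_continuous_subsequence := by
  intro subseq seq _ hpre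
  unfold Spec_is_continuous_subsequence
  unfold is_continuous_subsequence is_continuous_subsequence_alt
  obtain ⟨x, xs, rfl⟩ : ∃ x xs, subseq = x :: xs := by
    cases subseq with
    | nil => exact absurd rfl hpre
    | cons x xs => exact ⟨x, xs, rfl⟩
  have h0 : PySem.List.pyGet? (x :: xs) (0 : Int) = some x := PySem.List.pyGet?_zero_cons x xs
  have hlast : ∃ lst, PySem.List.pyGet? (x :: xs) (-1 : Int) = some lst := by
    rw [PySem.List.pyGet?_neg_one]
    exact ⟨(x :: xs).getLast (by simp), List.getLast?_eq_some_getLast (by simp)⟩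
  obtain ⟨lst, hlst⟩ := hlast
  rw [h0, hlst]
  simp only []
  rw [pvIcsLoop_eq_any]
  rw [Bool.eq_iff_iff]
  simp only [List.any_eq_true]
  constructor
  · rintro ⟨idx, hmem, hpred⟩
    rw [pvFindAllIndexes_mem] at hmem
    obtain ⟨hklen, hkval⟩ := hmem
    simp only [Bool.and_eq_true, decide_eq_true_eq] at hpred
    obtain ⟨hne, heqb⟩ := hpred
    have hidx1 : idx + 1 < seq.length := by omega
    have hdlen : idx < (seq.drop 1).length := by simp [List.length_drop]; omega
    have hzlen : idx < (seq.zip (seq.drop 1)).length := by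
      simp [List.length_zip, List.length_drop]; omega
    refine ⟨(seq.zip (seq.drop 1))[idx], List.mem_iff_getElem.mpr ⟨idx, hzlen, rfl⟩, ?_⟩
    simp only [List.getElem_zip, Bool.and_eq_true, beq_iff_eq]
    constructor
    · have := hkval
      rw [List.getElem?_eq_getElem hklen] at this
      exact Option.some_injective _ this
    · rw [hlst] at heqb
      have hcast : ((idx : Int) + 1) = ((idx + 1 : Nat) : Int) := by push_cast; ring
      rw [hcast, PySem.List.pyGet?_natCast, List.getElem?_eq_getElem hidx1] at heqb
      have hdrop : (seq.drop 1)[idx]'hdlen = seq[idx + 1] := by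
        rw [List.getElem_drop]; congr 1; omega
      rw [hdrop]
      simpa using heqb
  · rintro ⟨p, hpmem, hp⟩
    obtain ⟨i, hizip, rfl⟩ := List.mem_iff_getElem.mp hpmem
    have hilen : i + 1 < seq.length := by
      simp [List.length_zip, List.length_drop] at hizip; omega
    have hdlen : i < (seq.drop 1).length := by simp [List.length_drop]; omega
    simp only [List.getElem_zip, Bool.and_eq_true, beq_iff_eq] at hp
    obtain ⟨hfst, hsnd⟩ := hp
    refine ⟨i, ?_, ?_⟩
    · rw [pvFindAllIndexes_mem]
      refine ⟨by omega, ?_⟩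
      rw [List.getElem?_eq_getElem (by omega : i < seq.length), hfst]
    · simp only [Bool.and_eq_true, decide_eq_true_eq]
      refine ⟨by omega, ?_⟩
      rw [hlst]
      have hcast : ((i : Int) + 1) = ((i + 1 : Nat) : Int) := by push_cast; ring
      rw [hcast, PySem.List.pyGet?_natCast, List.getElem?_eq_getElem hilen]
      have hdrop : (seq.drop 1)[i]'hdlen = seq[i + 1] := by
        rw [List.getElem_drop]; congr 1; omega
      rw [hdrop] at hsnd
      simp [hsnd]
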